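-- pv_equiv track=rewrite | github.com/mc9ueen/coding_practice | yandex.practicum/hash_tables/H_weird_comparison.py | hash_func
-- ===== SOURCE A (Python) =====
-- def hash_func(word: str) -> int:
--     count_letters = dict()
--     for w in word:
--         if not count_letters.get(w):
--             count_letters[w] = 1
--         else:
--             count_letters[w] = count_letters[w] + 1
--     result = 0
--     for i in range(len(word)):
--         result += (i + 1) * count_letters[word[i]]
--     return result
-- ===== SOURCE B (Python) =====
-- def hash_func(word: str) -> int:
--     n = {}
--     pos = {}
--     for i, c in enumerate(word):
--         n[c] = n.get(c, 0) + 1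
--         pos[c] = pos.get(c, 0) + (i + 1)
--     return sum(n[c] * pos[c] for c in n)
-- ===== Notes on version B (the rewrite author's own statement) =====
-- stated objective: alternative
-- what changed: Instead of building a count dict and then re-scanning every position looking the count up again, B makes a single enumerate pass accumulating per-letter count and 1-based position sums, and reduces over the distinct letters using the identity sum_i (i+1)*cnt[w_i] = sum_c cnt[c]*possum[c].
import Mathlib
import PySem

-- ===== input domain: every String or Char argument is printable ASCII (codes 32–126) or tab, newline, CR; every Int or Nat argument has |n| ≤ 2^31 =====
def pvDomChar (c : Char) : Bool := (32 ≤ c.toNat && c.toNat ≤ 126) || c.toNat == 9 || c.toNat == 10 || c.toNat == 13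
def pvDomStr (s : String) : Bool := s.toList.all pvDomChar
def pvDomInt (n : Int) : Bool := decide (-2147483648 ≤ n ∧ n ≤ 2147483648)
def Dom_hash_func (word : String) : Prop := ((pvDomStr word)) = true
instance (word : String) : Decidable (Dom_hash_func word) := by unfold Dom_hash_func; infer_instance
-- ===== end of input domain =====

-- B replaces A's build-count-dict-then-rescan-all-positions with a single enumerate pass over two
-- per-letter accumulators (count and 1-based position sum) reduced over the distinct letters
-- (alternative decomposition; same cost).

-- ===== PORT A =====
def hash_func (word : String) : Int :=
  let count_letters := word.toList.foldl
    (fun d w =>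
      if (match PySem.Dict.get? d w with
          | none => true
          | some v => v == 0) then d.insert w 1
      else d.insert w (d.getD w 0 + 1))
    PySem.Dict.empty
  (PySem.List.pyRange 0 (word.toList.length : Int) 1).foldl
    (fun result i =>
      result + (i + 1) * count_letters.getD (PySem.List.pyGetD word.toList i ' ') 0)
    0

-- ===== PORT B =====
def hash_func_alt (word : String) : Int :=
  let st := (PySem.List.enumerate word.toList 0).foldl
    (fun (st : PySem.Dict Char Int × PySem.Dict Char Int) p =>
      (st.1.insert p.2 (st.1.getD p.2 0 + 1),
       st.2.insert p.2 (st.2.getD p.2 0 + (p.1 + 1))))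
    (PySem.Dict.empty, PySem.Dict.empty)
  (st.1.keys.map (fun c => st.1.getD c 0 * st.2.getD c 0)).sum

-- ===== PRECONDITION & SPEC =====
def Spec_hash_func (word : String) (out : Int) : Prop := out = hash_func_alt word
instance (word : String) (out : Int) : Decidable (Spec_hash_func word out) := by unfold Spec_hash_func; infer_instance

-- ===== CLAIM (what is proved, stated in full; the proofs are below) =====
def Claim_equal_hash_func : Prop := ∀ (word : String), Dom_hash_func word → Spec_hash_func word (hash_func word)

-- ===== LEMMAS AND PROOFS =====

-- per-letter quantities both programs compute: count and sum of 1-based positions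
def pvCnt (l : List Char) (c : Char) : Int := (l.count c : Int)
def pvP (l : List Char) (c : Char) : Int :=
  (((PySem.List.enumerate l 0).filter (fun p => p.2 == c)).map (fun p => p.1 + 1)).sum
def pvS1 (l : List Char) : Int :=
  ((PySem.List.enumerate l 0).map (fun p => (p.1 + 1) * pvCnt l p.2)).sum
def pvS2 (l : List Char) : Int :=
  ((PySem.Set.ofList l).map (fun c => pvCnt l c * pvP l c)).sum


theorem pv_foldA_eq_counter (l : List Char) (d : PySem.Dict Char Int)
    (hpos : ∀ k v, d.get? k = some v → 0 < v) :
    l.foldl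
      (fun d w =>
        if (match PySem.Dict.get? d w with
            | none => true
            | some v => v == 0) then d.insert w 1
        else d.insert w (d.getD w 0 + 1)) d
    = l.foldl (fun d x => d.insert x (d.getD x 0 + 1)) d := by
  induction l generalizing d with
  | nil => rfl
  | cons x l ih =>
    simp only [List.foldl_cons]
    have hstep :
        (if (match PySem.Dict.get? d x with
             | none => true
             | some v => v == 0) then d.insert x 1
         else d.insert x (d.getD x 0 + 1)) = d.insert x (d.getD x 0 + 1) := by
      cases h : d.get? x with
      | none =>
        have hg : d.getD x 0 = 0 := by rw [PySem.Dict.getD_eq_get?_getD, h]; rfl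
        simp [hg]
      | some v =>
        have hv := hpos x v h
        have hg : d.getD x 0 = v := by rw [PySem.Dict.getD_eq_get?_getD, h]; rfl
        simp [hg]
        intro hv0; omega
    rw [hstep, ih]
    intro k v hk
    rw [PySem.Dict.get?_insert] at hk
    by_cases hkx : k = x
    · simp [hkx] at hk
      cases h : d.get? x with
      | none =>
        have hg : d.getD x 0 = 0 := by rw [PySem.Dict.getD_eq_get?_getD, h]; rfl
        rw [hg] at hk; omega
      | some u =>
        have := hpos x u h
        have hg : d.getD x 0 = u := by rw [PySem.Dict.getD_eq_get?_getD, h]; rfl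
        rw [hg] at hk; omega
    · simp [hkx] at hk
      exact hpos k v hk

theorem pv_getD_fold_key (w : Int × Char → Int) (L : List (Int × Char)) (d : PySem.Dict Char Int) (c : Char) :
    (L.foldl (fun d p => d.insert p.2 (d.getD p.2 0 + w p)) d).getD c 0
    = d.getD c 0 + ((L.filter (fun p => p.2 == c)).map w).sum := by
  induction L generalizing d with
  | nil => simp
  | cons p L ih =>
    simp only [List.foldl_cons, List.filter_cons, ih]
    by_cases h : c = p.2
    · simp [h, eq_comm]; ring
    · simp [PySem.Dict.getD_insert, h, Ne.symm h]

theorem pv_count_fold (L : List (Int × Char)) (c : Char) :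
    ((L.filter (fun p => p.2 == c)).map (fun _ => (1:Int))).sum
    = ((L.map (·.2)).count c : Int) := by
  simp [List.count_eq_countP, List.countP_eq_length_filter, List.filter_map, Function.comp_def]

theorem pv_enum_append (l : List Char) (x : Char) :
    PySem.List.enumerate (l ++ [x]) 0
    = PySem.List.enumerate l 0 ++ [((l.length : Int), x)] := by
  rw [PySem.List.enumerate_append]
  simp [PySem.List.enumerate_cons, PySem.List.enumerate_nil]

theorem pvCnt_append (l : List Char) (x c : Char) :
    pvCnt (l ++ [x]) c = pvCnt l c + (if x = c then 1 else 0) := by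
  rw [pvCnt, pvCnt, List.count_append]
  by_cases h : x = c
  · simp [h]
  · simp [h]

theorem pvP_append (l : List Char) (x c : Char) :
    pvP (l ++ [x]) c = pvP l c + (if x = c then (l.length : Int) + 1 else 0) := by
  rw [pvP, pv_enum_append, List.filter_append, List.map_append, List.sum_append, pvP]
  congr 1
  by_cases h : x = c <;> simp [h]

theorem pvCnt_zero (l : List Char) (x : Char) (hx : x ∉ l) : pvCnt l x = 0 := by
  simp [pvCnt, List.count_eq_zero.mpr hx]

theorem pvP_zero (l : List Char) (x : Char) (hx : x ∉ l) : pvP l x = 0 := by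
  rw [pvP]
  have : (PySem.List.enumerate l 0).filter (fun p => p.2 == x) = [] := by
    rw [List.filter_eq_nil_iff]
    intro p hp hbeq
    have : p.2 ∈ (PySem.List.enumerate l 0).map (·.2) := List.mem_map_of_mem hp
    rw [PySem.List.map_snd_enumerate] at this
    exact hx (beq_iff_eq.mp hbeq ▸ this)
  simp [this]

theorem pv_sum_update (K : List Char) (hnd : K.Nodup) (x : Char) (hx : x ∈ K)
    (f g : Char → Int) (h : ∀ c, c ≠ x → f c = g c) :
    (K.map f).sum = (K.map g).sum + (f x - g x) := by
  induction K with
  | nil => simp at hx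
  | cons c K ih =>
    rcases List.mem_cons.mp hx with hcx | hxK
    · subst hcx
      have hK : ∀ a ∈ K, f a = g a := fun a ha =>
        h a (fun hax => (List.nodup_cons.mp hnd).1 (hax ▸ ha))
      simp [List.map_congr_left hK]
      ring
    · have hcx : c ≠ x := fun hcx => (List.nodup_cons.mp hnd).1 (hcx ▸ hxK)
      simp only [List.map_cons, List.sum_cons, ih (List.nodup_cons.mp hnd).2 hxK, h c hcx]
      ring

theorem pv_sum_ind (L : List (Int × Char)) (x : Char) :
    (L.map (fun p => (p.1 + 1) * (if x = p.2 then (1:Int) else 0))).sum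
    = ((L.filter (fun p => p.2 == x)).map (fun p => p.1 + 1)).sum := by
  induction L with
  | nil => rfl
  | cons p L ih =>
    rw [List.map_cons, List.sum_cons, List.filter_cons, ih]
    by_cases h : x = p.2
    · rw [if_pos h, if_pos (beq_iff_eq.mpr h.symm), List.map_cons, List.sum_cons]
      ring
    · rw [if_neg h, if_neg (by simp only [beq_iff_eq]; exact fun hh => h hh.symm)]
      ring

theorem pvS1_append (l : List Char) (x : Char) :
    pvS1 (l ++ [x]) = pvS1 l + pvP l x + ((l.length : Int) + 1) * (pvCnt l x + 1) := by
  rw [pvS1, pv_enum_append, List.map_append, List.sum_append]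
  have h1 : (PySem.List.enumerate l 0).map (fun p => (p.1 + 1) * pvCnt (l ++ [x]) p.2)
      = (PySem.List.enumerate l 0).map
          (fun p => (p.1 + 1) * pvCnt l p.2 + (p.1 + 1) * (if x = p.2 then 1 else 0)) := by
    apply List.map_congr_left
    intro p _
    rw [pvCnt_append]; ring
  rw [h1, List.sum_map_add, pv_sum_ind]
  simp only [List.map_cons, List.map_nil, List.sum_cons, List.sum_nil, add_zero]
  rw [pvCnt_append]
  simp only [pvS1, pvP, if_true]

theorem pvS2_append (l : List Char) (x : Char) :
    pvS2 (l ++ [x]) = pvS2 l + pvP l x + ((l.length : Int) + 1) * (pvCnt l x + 1) := by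
  by_cases hx : x ∈ l
  · have hofl : PySem.Set.ofList (l ++ [x]) = PySem.Set.ofList l := by
      rw [PySem.Set.ofList_append_singleton, PySem.Set.add_of_mem ((PySem.Set.mem_ofList l x).mpr hx)]
    rw [pvS2, hofl]
    rw [pv_sum_update (PySem.Set.ofList l) (PySem.Set.nodup_ofList l) x ((PySem.Set.mem_ofList l x).mpr hx)
          (fun c => pvCnt (l ++ [x]) c * pvP (l ++ [x]) c) (fun c => pvCnt l c * pvP l c)
          (by intro c hc
              show pvCnt (l ++ [x]) c * pvP (l ++ [x]) c = pvCnt l c * pvP l c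
              rw [pvCnt_append, pvP_append]; simp [Ne.symm hc])]
    rw [pvCnt_append, pvP_append]
    simp only [pvS2, if_true]
    ring
  · have hofl : PySem.Set.ofList (l ++ [x]) = PySem.Set.ofList l ++ [x] := by
      rw [PySem.Set.ofList_append_singleton,
          PySem.Set.add_of_not_mem (fun h => hx ((PySem.Set.mem_ofList l x).mp h))]
    rw [pvS2, hofl, List.map_append, List.sum_append]
    have h1 : (PySem.Set.ofList l).map (fun c => pvCnt (l ++ [x]) c * pvP (l ++ [x]) c)
        = (PySem.Set.ofList l).map (fun c => pvCnt l c * pvP l c) := by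
      apply List.map_congr_left
      intro c hc
      have hcx : x ≠ c := fun h => hx (h ▸ (PySem.Set.mem_ofList l c).mp hc)
      rw [pvCnt_append, pvP_append]
      simp [hcx]
    rw [h1]
    simp only [List.map_cons, List.map_nil, List.sum_cons, List.sum_nil, add_zero]
    rw [pvCnt_append, pvP_append, pvCnt_zero l x hx, pvP_zero l x hx]
    simp only [pvS2, if_true]
    ring

theorem hash_func_eq_S1 (word : String) : hash_func word = pvS1 word.toList := by
  have hdef : hash_func word =
      (PySem.List.pyRange 0 (word.toList.length : Int) 1).foldl
        (fun result i =>
          result + (i + 1) *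
            (word.toList.foldl
              (fun d w =>
                if (match PySem.Dict.get? d w with
                    | none => true
                    | some v => v == 0) then d.insert w 1
                else d.insert w (d.getD w 0 + 1))
              PySem.Dict.empty).getD (PySem.List.pyGetD word.toList i ' ') 0)
        0 := rfl
  rw [hdef, pv_foldA_eq_counter _ _ (by simp [PySem.Dict.get?_empty])]
  have hcnt : ∀ c : Char,
      (word.toList.foldl (fun d x => d.insert x (d.getD x 0 + 1)) PySem.Dict.empty).getD c 0
      = pvCnt word.toList c := by
    intro c
    rw [PySem.Dict.getD_foldl_insert_add_one]
    simp [pvCnt]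
  simp only [hcnt]
  have henum := PySem.List.enumerate_eq_map_pyRange (xs := word.toList) (d := ' ')
  have hlen : PySem.List.len word.toList = (word.toList.length : Int) := by simp
  rw [hlen] at henum
  rw [pvS1, henum, List.map_map]
  rw [PySem.List.foldl_add (g := fun i => (i + 1) * pvCnt word.toList (PySem.List.pyGetD word.toList i ' '))]
  simp [Function.comp_def]

theorem hash_func_alt_eq_S2 (word : String) : hash_func_alt word = pvS2 word.toList := by
  have hdef : hash_func_alt word =
      (((PySem.List.enumerate word.toList 0).foldl
          (fun (st : PySem.Dict Char Int × PySem.Dict Char Int) p =>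
            (st.1.insert p.2 (st.1.getD p.2 0 + 1),
             st.2.insert p.2 (st.2.getD p.2 0 + (p.1 + 1))))
          (PySem.Dict.empty, PySem.Dict.empty)).1.keys.map
        (fun c =>
          ((PySem.List.enumerate word.toList 0).foldl
            (fun (st : PySem.Dict Char Int × PySem.Dict Char Int) p =>
              (st.1.insert p.2 (st.1.getD p.2 0 + 1),
               st.2.insert p.2 (st.2.getD p.2 0 + (p.1 + 1))))
            (PySem.Dict.empty, PySem.Dict.empty)).1.getD c 0 *
          ((PySem.List.enumerate word.toList 0).foldl
            (fun (st : PySem.Dict Char Int × PySem.Dict Char Int) p =>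
              (st.1.insert p.2 (st.1.getD p.2 0 + 1),
               st.2.insert p.2 (st.2.getD p.2 0 + (p.1 + 1))))
            (PySem.Dict.empty, PySem.Dict.empty)).2.getD c 0)).sum := rfl
  rw [hdef]
  unfold pvS2
  rw [PySem.List.foldl_prod_mk
        (f := fun (d : PySem.Dict Char Int) (p : Int × Char) => d.insert p.2 (d.getD p.2 0 + 1))
        (g := fun (d : PySem.Dict Char Int) (p : Int × Char) => d.insert p.2 (d.getD p.2 0 + (p.1 + 1)))]
  rw [PySem.Dict.keys_foldl_insert_key (key := fun p : Int × Char => p.2)]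
  simp only [PySem.List.map_snd_enumerate, PySem.Dict.keys_empty, PySem.Set.update_nil_left]
  congr 1
  apply List.map_congr_left
  intro c hc
  rw [pv_getD_fold_key (fun _ => (1:Int)), pv_getD_fold_key (fun p => p.1 + 1)]
  simp only [PySem.Dict.getD_empty, zero_add]
  rw [pv_count_fold]
  simp [pvCnt, pvP, PySem.List.map_snd_enumerate]

theorem S1_eq_S2 (l : List Char) : pvS1 l = pvS2 l := by
  induction l using List.reverseRecOn with
  | nil => rfl
  | append_singleton l x ih => rw [pvS1_append, pvS2_append, ih]

-- ===== VERDICT (by name: the statement is the Claim_ definition above) =====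
theorem hash_func_spec : Claim_equal_hash_func := by
  intro word _
  unfold Spec_hash_func
  rw [hash_func_eq_S1, hash_func_alt_eq_S2, S1_eq_S2]
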